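-- pv_equiv track=rewrite | github.com/Moussa-Kalla/Advent_of_code_2024 | main/Day_22.py | partie2
-- ===== SOURCE A (Python) =====
-- from collections import defaultdict
--
-- def partie2(donnees):
--     prix = []
--     for secret in map(int, donnees):
--         prix_individuel = []
--         for _ in range(2000):
--             secret = ((secret * 64) ^ secret) % 16777216
--             secret = ((secret // 32) ^ secret) % 16777216
--             secret = ((secret * 2048) ^ secret) % 16777216
--             prix_individuel.append(secret % 10)
--         prix.append(prix_individuel)
--
--     changements = [[b - a for a, b in zip(p, p[1:])] for p in prix]
--
--     montants = defaultdict(int)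
--     for acheteur_idx, changement in enumerate(changements):
--         cles = set()
--         for i in range(len(changement) - 3):
--             cle = tuple(changement[i : i + 4])
--             if cle in cles:
--                 continue
--             montants[cle] += prix[acheteur_idx][i + 4]
--             cles.add(cle)
--     montant_maximal = max(montants.values())
--
--     return montant_maximal
-- ===== SOURCE B (Python) =====
-- def partie2(donnees):
--     montants = {}
--     for ligne in donnees:
--         secret = int(ligne)
--         prev = None
--         fenetre = []
--         vus = set()
--         for _ in range(2000):
--             secret = ((secret * 64) ^ secret) % 16777216
--             secret = ((secret // 32) ^ secret) % 16777216
--             secret = ((secret * 2048) ^ secret) % 16777216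
--             prix = secret % 10
--             if prev is not None:
--                 fenetre = (fenetre + [prix - prev])[-4:]
--                 if len(fenetre) == 4:
--                     cle = tuple(fenetre)
--                     if cle not in vus:
--                         vus.add(cle)
--                         montants[cle] = montants.get(cle, 0) + prix
--             prev = prix
--     return max(montants.values())
-- ===== Notes on version B (the rewrite author's own statement) =====
-- stated objective: alternative
-- what changed: A materialises all 2000 prices per buyer, then a full change list, then scans windows by index with slicing; B fuses the three phases into one streaming pass per buyer, generating each secret/price on the fly and maintaining a rolling window of the last four changes, accumulating rewards into one dict.
import Mathlib
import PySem

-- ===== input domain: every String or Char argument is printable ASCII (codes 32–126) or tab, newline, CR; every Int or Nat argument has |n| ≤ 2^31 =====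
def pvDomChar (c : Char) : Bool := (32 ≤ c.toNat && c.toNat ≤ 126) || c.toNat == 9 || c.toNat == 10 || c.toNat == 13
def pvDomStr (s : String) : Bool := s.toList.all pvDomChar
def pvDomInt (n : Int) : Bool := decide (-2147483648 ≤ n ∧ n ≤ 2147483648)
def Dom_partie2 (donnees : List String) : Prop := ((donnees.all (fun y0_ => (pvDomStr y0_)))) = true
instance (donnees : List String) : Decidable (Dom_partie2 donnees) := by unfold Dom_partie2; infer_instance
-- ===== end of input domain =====

-- B fuses A's three phases (generate all prices, build change lists, scan windows by index)
-- into one streaming pass per buyer with a rolling 4-change window; same exact result, similar cost.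

-- ===== PORT A =====
-- shared helper: the three-line secret update both Pythons contain verbatim
def pvNext (s : Int) : Int :=
  let s1 := PySem.Int.mod (PySem.Int.bxor (s * 64) s) 16777216
  let s2 := PySem.Int.mod (PySem.Int.bxor (PySem.Int.floordiv s1 32) s1) 16777216
  PySem.Int.mod (PySem.Int.bxor (s2 * 2048) s2) 16777216

def partie2 (donnees : List String) : Int :=
  -- prix: for each parsed secret, 2000 iterations appending secret % 10
  let prix : List (List Int) := donnees.foldl (fun acc ligne =>
    let secret0 := (PySem.Int.ofStr? ligne).getD 0   -- int(ligne); Pre_ guarantees some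
    let r := (PySem.List.pyRange 0 2000 1).foldl
      (fun (st : Int × List Int) _ =>
        let s := pvNext st.1
        (s, st.2 ++ [PySem.Int.mod s 10])) (secret0, [])
    acc ++ [r.2]) []
  -- changements = [[b - a for a, b in zip(p, p[1:])] for p in prix]
  let changements : List (List Int) :=
    prix.map (fun p => (p.zip (PySem.List.slice p (some 1) none)).map (fun ab => ab.2 - ab.1))
  -- montants loop over enumerate(changements)
  let montants : PySem.Dict (List Int) Int :=
    (PySem.List.enumerate changements 0).foldl (fun m pair =>
      ((PySem.List.pyRange 0 (PySem.List.len pair.2 - 3) 1).foldl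
        (fun (st : PySem.Dict (List Int) Int × PySem.Set (List Int)) i =>
          let cle := PySem.List.slice pair.2 (some i) (some (i + 4))
          if st.2.contains cle then st
          else (st.1.modify cle 0 (· + PySem.List.pyGetD (PySem.List.pyGetD prix pair.1 []) (i + 4) 0),
                PySem.Set.add st.2 cle))
        (m, PySem.Set.empty)).1) PySem.Dict.empty
  (PySem.List.max? montants.values (fun v => v)).getD 0   -- max(montants.values()); Pre_ guarantees nonempty

-- ===== PORT B =====
def partie2_alt (donnees : List String) : Int :=
  let montants : PySem.Dict (List Int) Int := donnees.foldl (fun m ligne =>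
    let secret0 := (PySem.Int.ofStr? ligne).getD 0   -- int(ligne); Pre_ guarantees some
    let r := (PySem.List.pyRange 0 2000 1).foldl
      (fun (st : Int × Option Int × List Int × PySem.Set (List Int) × PySem.Dict (List Int) Int) _ =>
        let s := pvNext st.1
        let prixc := PySem.Int.mod s 10
        match st.2.1 with
        | none => (s, some prixc, st.2.2.1, st.2.2.2.1, st.2.2.2.2)
        | some prev =>
          let fen := PySem.List.slice (st.2.2.1 ++ [prixc - prev]) (some (-4)) none
          if PySem.List.len fen = 4 then
            if st.2.2.2.1.contains fen then (s, some prixc, fen, st.2.2.2.1, st.2.2.2.2)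
            else (s, some prixc, fen, PySem.Set.add st.2.2.2.1 fen,
                  st.2.2.2.2.insert fen (st.2.2.2.2.getD fen 0 + prixc))
          else (s, some prixc, fen, st.2.2.2.1, st.2.2.2.2))
      (secret0, none, [], PySem.Set.empty, m)
    r.2.2.2.2) PySem.Dict.empty
  (PySem.List.max? montants.values (fun v => v)).getD 0

-- ===== PRECONDITION & SPEC =====
-- Pre_ excludes exactly the inputs where A raises: an empty list (max() on an empty dict,
-- ValueError) and any string int() cannot parse (ValueError).
def Pre_partie2 (donnees : List String) : Prop :=
  donnees ≠ [] ∧ ∀ s ∈ donnees, (PySem.Int.ofStr? s).isSome = true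
instance (donnees : List String) : Decidable (Pre_partie2 donnees) := by unfold Pre_partie2; infer_instance
def pvWitness_partie2 : List String := (["1", "-2"])

def Spec_partie2 (donnees : List String) (out : Int) : Prop := out = partie2_alt donnees
instance (donnees : List String) (out : Int) : Decidable (Spec_partie2 donnees out) := by unfold Spec_partie2; infer_instance

-- ===== CLAIM (what is proved, stated in full; the proofs are below) =====
def Claim_equal_partie2 : Prop := ∀ (donnees : List String), Dom_partie2 donnees → Pre_partie2 donnees → Spec_partie2 donnees (partie2 donnees)

-- ===== LEMMAS AND PROOFS =====

-- proof-side vocabulary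
def pvPrixList : Int → Nat → List Int
  | _, 0 => []
  | s, n + 1 => PySem.Int.mod (pvNext s) 10 :: pvPrixList (pvNext s) n

def pvPow : Int → Nat → Int
  | s, 0 => s
  | s, n + 1 => pvPow (pvNext s) n

def pvChanges (p : List Int) : List Int :=
  (p.zip (PySem.List.slice p (some 1) none)).map (fun ab => ab.2 - ab.1)

def pvWin (p : List Int) : List Int :=
  (pvChanges p).drop ((pvChanges p).length - 4)

def pvUpdA (p : List Int) (st : PySem.Dict (List Int) Int × PySem.Set (List Int)) (i : Int) :
    PySem.Dict (List Int) Int × PySem.Set (List Int) :=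
  let cle := PySem.List.slice (pvChanges p) (some i) (some (i + 4))
  if st.2.contains cle then st
  else (st.1.modify cle 0 (· + PySem.List.pyGetD p (i + 4) 0), PySem.Set.add st.2 cle)

def pvAfold (p : List Int) (m : PySem.Dict (List Int) Int) :
    PySem.Dict (List Int) Int × PySem.Set (List Int) :=
  (PySem.List.pyRange 0 (PySem.List.len (pvChanges p) - 3) 1).foldl (pvUpdA p) (m, PySem.Set.empty)

def pvStep (st : Option Int × List Int × PySem.Set (List Int) × PySem.Dict (List Int) Int)
    (x : Int) : Option Int × List Int × PySem.Set (List Int) × PySem.Dict (List Int) Int :=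
  match st.1 with
  | none => (some x, st.2.1, st.2.2.1, st.2.2.2)
  | some prev =>
    let fen := PySem.List.slice (st.2.1 ++ [x - prev]) (some (-4)) none
    if PySem.List.len fen = 4 then
      if st.2.2.1.contains fen then (some x, fen, st.2.2.1, st.2.2.2)
      else (some x, fen, PySem.Set.add st.2.2.1 fen,
            st.2.2.2.insert fen (st.2.2.2.getD fen 0 + x))
    else (some x, fen, st.2.2.1, st.2.2.2)
theorem pvChanges_cons (a : Int) (r : List Int) (h : r ≠ []) :
    pvChanges (a :: r) = (r.head h - a) :: pvChanges r := by
  cases r with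
  | nil => exact absurd rfl h
  | cons b t =>
    simp [pvChanges, PySem.List.slice_from_one, List.zip]

theorem pvChanges_snoc (p : List Int) (y x : Int) :
    pvChanges ((p ++ [y]) ++ [x]) = pvChanges (p ++ [y]) ++ [x - y] := by
  induction p with
  | nil => simp [pvChanges, PySem.List.slice_from_one, List.zip]
  | cons a p' ih =>
    have h1 : (p' ++ [y]) ++ [x] ≠ [] := by simp
    have h2 : p' ++ [y] ≠ [] := by simp
    rw [List.cons_append, List.cons_append, pvChanges_cons a _ h1,
        pvChanges_cons a _ h2]
    have hh : ((p' ++ [y]) ++ [x]).head h1 = (p' ++ [y]).head h2 := by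
      cases p' with
      | nil => rfl
      | cons c t => rfl
    rw [hh, ih]
    rfl

theorem length_pvChanges (p : List Int) : (pvChanges p).length = p.length - 1 := by
  simp [pvChanges, PySem.List.slice_from_one]
-- rolling window lemma: appending a change to the kept window keeps exactly the last ≤4
theorem pvWin_snoc (l : List Int) (c : Int) :
    PySem.List.slice ((l.drop (l.length - 4)) ++ [c]) (some (-4)) none
      = (l ++ [c]).drop ((l.length + 1) - 4) := by
  rw [PySem.List.slice_from_neg_ofNat _ 4 (by omega)]
  rw [List.drop_append_of_le_length (by simp)]
  rw [List.drop_append_of_le_length (by omega)]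
  rw [List.drop_drop]
  congr 2
  simp
  omega
theorem pv_genA_fold (l : List Int) : ∀ (s : Int) (acc : List Int),
    l.foldl (fun (st : Int × List Int) _ =>
        let s' := pvNext st.1
        (s', st.2 ++ [PySem.Int.mod s' 10])) (s, acc)
      = (pvPow s l.length, acc ++ pvPrixList s l.length) := by
  induction l with
  | nil => intro s acc; simp [pvPow, pvPrixList]
  | cons a t ih =>
    intro s acc
    simp only [List.foldl_cons, List.length_cons, ih, pvPow, pvPrixList]
    simp

theorem pv_genB_fold (l : List Int) : ∀ (s : Int)
    (q : Option Int × List Int × PySem.Set (List Int) × PySem.Dict (List Int) Int),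
    l.foldl (fun (st : Int × Option Int × List Int × PySem.Set (List Int) × PySem.Dict (List Int) Int) _ =>
        let s' := pvNext st.1
        let prixc := PySem.Int.mod s' 10
        match st.2.1 with
        | none => (s', some prixc, st.2.2.1, st.2.2.2.1, st.2.2.2.2)
        | some prev =>
          let fen := PySem.List.slice (st.2.2.1 ++ [prixc - prev]) (some (-4)) none
          if PySem.List.len fen = 4 then
            if st.2.2.2.1.contains fen then (s', some prixc, fen, st.2.2.2.1, st.2.2.2.2)
            else (s', some prixc, fen, PySem.Set.add st.2.2.2.1 fen,
                  st.2.2.2.2.insert fen (st.2.2.2.2.getD fen 0 + prixc))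
          else (s', some prixc, fen, st.2.2.2.1, st.2.2.2.2)) (s, q)
      = (pvPow s l.length, (pvPrixList s l.length).foldl pvStep q) := by
  induction l with
  | nil => intro s q; simp [pvPow, pvPrixList]
  | cons a t ih =>
    intro s q
    simp only [List.foldl_cons, List.length_cons, pvPow, pvPrixList]
    rw [← ih (pvNext s) (pvStep q (PySem.Int.mod (pvNext s) 10))]
    congr 1
    rcases q with ⟨p1, p2, p3, p4⟩
    cases p1 with
    | none => simp [pvStep]
    | some pv => simp [pvStep]; split_ifs <;> rfl

theorem pvAfold_short (p : List Int) (m : PySem.Dict (List Int) Int)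
    (h : (pvChanges p).length ≤ 3) : pvAfold p m = (m, PySem.Set.empty) := by
  unfold pvAfold
  rw [PySem.List.pyRange_one_eq_nil (by simp [PySem.List.len_eq]; omega)]
  rfl

theorem pv_slice_frozen (ch : List Int) (c : Int) (i : Int) (h0 : 0 ≤ i)
    (h4 : i.toNat + 4 ≤ ch.length) :
    PySem.List.slice (ch ++ [c]) (some i) (some (i + 4))
      = PySem.List.slice ch (some i) (some (i + 4)) := by
  rw [PySem.List.slice_toNat _ h0 (by omega), PySem.List.slice_toNat _ h0 (by omega)]
  rw [List.drop_append_of_le_length (by omega)]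
  rw [List.take_append_of_le_length (by simp; omega)]

theorem pv_core (m : PySem.Dict (List Int) Int) (p : List Int) :
    p.foldl pvStep (none, [], PySem.Set.empty, m)
      = (p.getLast?, pvWin p, (pvAfold p m).2, (pvAfold p m).1) := by
  induction p using List.reverseRecOn with
  | nil => rfl
  | append_singleton p x ih =>
    rw [List.foldl_append, ih]
    rcases p.eq_nil_or_concat with rfl | ⟨p', y, rfl⟩
    · rfl
    · -- p = p' ++ [y]
      simp only [List.concat_eq_append] at ih ⊢
      have hlast : ((p' ++ [y]).getLast?) = some y := by simp
      have hlastq : (((p' ++ [y]) ++ [x]).getLast?) = some x := by simp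
      set k := p'.length with hk
      have hlen : (pvChanges (p' ++ [y])).length = k := by
        rw [length_pvChanges]; simp; omega
      have hlenq : (pvChanges ((p' ++ [y]) ++ [x])).length = k + 1 := by
        rw [length_pvChanges]; simp; omega
      have hchq : pvChanges ((p' ++ [y]) ++ [x]) = pvChanges (p' ++ [y]) ++ [x - y] :=
        pvChanges_snoc p' y x
      -- the streaming window update equals the spec window of the extended list
      have hfen : PySem.List.slice (pvWin (p' ++ [y]) ++ [x - y]) (some (-4)) none
          = pvWin ((p' ++ [y]) ++ [x]) := by
        unfold pvWin
        rw [hchq, pvWin_snoc, hlen]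
        congr 1
        simp [hlen]
      have hfenlen : (pvWin ((p' ++ [y]) ++ [x])).length = (k + 1) - ((k + 1) - 4) := by
        unfold pvWin
        rw [List.length_drop, hlenq]
      rw [hlast, hlastq]
      show pvStep (some y, pvWin (p' ++ [y]), (pvAfold (p' ++ [y]) m).2, (pvAfold (p' ++ [y]) m).1) x = _
      unfold pvStep
      simp only [hfen]
      by_cases hk3 : k ≥ 3
      · -- window full: one more index in A's range
        have hfl : (pvWin ((p' ++ [y]) ++ [x])).length = 4 := by omega
        have hcond : (PySem.List.len (pvWin ((p' ++ [y]) ++ [x])) = (4 : Int)) := by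
          simp only [PySem.List.len_eq, hfl]; norm_num
        -- A's fold over the extended list
        have hbound : (PySem.List.len (pvChanges ((p' ++ [y]) ++ [x])) - 3 : Int)
            = ((k : Int) - 3) + 1 := by
          simp only [PySem.List.len_eq]; rw [hlenq]; omega
        have hpref : (PySem.List.pyRange 0 ((k : Int) - 3) 1).foldl
              (pvUpdA ((p' ++ [y]) ++ [x])) (m, PySem.Set.empty) = pvAfold (p' ++ [y]) m := by
          unfold pvAfold
          rw [show (PySem.List.len (pvChanges (p' ++ [y])) - 3 : Int) = (k : Int) - 3 by
            simp only [PySem.List.len_eq]; rw [hlen]]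
          apply PySem.List.foldl_congr_mem
          intro st i hi
          rw [PySem.List.mem_pyRange_one] at hi
          unfold pvUpdA
          rw [hchq, pv_slice_frozen _ _ _ (by omega) (by rw [hlen]; omega)]
          have hget : PySem.List.pyGetD ((p' ++ [y]) ++ [x]) (i + 4) 0
              = PySem.List.pyGetD (p' ++ [y]) (i + 4) 0 := by
            rw [PySem.List.pyGetD_eq_getElem _ _ (by omega) (by simp; omega),
                PySem.List.pyGetD_eq_getElem _ _ (by omega) (by simp; omega)]
            rw [List.getElem_append_left (by simp; omega)]
          rw [hget]
        have hsplit : pvAfold ((p' ++ [y]) ++ [x]) m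
            = pvUpdA ((p' ++ [y]) ++ [x]) (pvAfold (p' ++ [y]) m) ((k : Int) - 3) := by
          unfold pvAfold
          rw [hbound, PySem.List.pyRange_one_succ_right (by omega), List.foldl_append, hpref]
          rfl
        -- the final A-update touches exactly the streaming window and reward x
        have hcle : PySem.List.slice (pvChanges ((p' ++ [y]) ++ [x])) (some ((k : Int) - 3))
            (some (((k : Int) - 3) + 4)) = pvWin ((p' ++ [y]) ++ [x]) := by
          rw [PySem.List.slice_toNat _ (by omega) (by omega)]
          rw [show ((k : Int) - 3 + 4).toNat = k + 1 by omega,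
              show ((k : Int) - 3).toNat = k + 1 - 4 by omega]
          unfold pvWin
          rw [hlenq]
          apply List.take_of_length_le
          rw [List.length_drop, hlenq]
        have hrew : PySem.List.pyGetD ((p' ++ [y]) ++ [x]) (((k : Int) - 3) + 4) 0 = x := by
          rw [show ((k : Int) - 3) + 4 = ((k + 1 : Nat) : Int) by push_cast; omega]
          rw [PySem.List.pyGetD_natCast]
          rw [show k + 1 = (p' ++ [y]).length by simp [hk]]
          rw [List.getD_eq_getElem?_getD, List.getElem?_concat_length]
          rfl
        rw [hsplit]
        unfold pvUpdA
        simp only [hcle, hrew, hcond]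
        split_ifs <;> rfl
      · -- window not yet full: both folds are still empty
        have hcond : ¬ (PySem.List.len (pvWin ((p' ++ [y]) ++ [x])) = (4 : Int)) := by
          simp only [PySem.List.len_eq, hfenlen]; omega
        rw [if_neg hcond]
        rw [pvAfold_short _ _ (by omega), pvAfold_short _ _ (by omega)]
theorem pv_hlen2000 : (PySem.List.pyRange 0 2000 1).length = 2000 := by
  rw [PySem.List.length_pyRange_one]; rfl

theorem pv_genA (l : List Int) (s0 : Int) :
    (l.foldl (fun (st : Int × List Int) _ =>
        let s := pvNext st.1
        (s, st.2 ++ [PySem.Int.mod s 10])) (s0, [])).2 = pvPrixList s0 l.length := by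
  rw [pv_genA_fold]
  exact List.nil_append _

theorem pv_genB (l : List Int) (s0 : Int) (m : PySem.Dict (List Int) Int) :
    (l.foldl
      (fun (st : Int × Option Int × List Int × PySem.Set (List Int) × PySem.Dict (List Int) Int) _ =>
        let s := pvNext st.1
        let prixc := PySem.Int.mod s 10
        match st.2.1 with
        | none => (s, some prixc, st.2.2.1, st.2.2.2.1, st.2.2.2.2)
        | some prev =>
          let fen := PySem.List.slice (st.2.2.1 ++ [prixc - prev]) (some (-4)) none
          if PySem.List.len fen = 4 then
            if st.2.2.2.1.contains fen then (s, some prixc, fen, st.2.2.2.1, st.2.2.2.2)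
            else (s, some prixc, fen, PySem.Set.add st.2.2.2.1 fen,
                  st.2.2.2.2.insert fen (st.2.2.2.2.getD fen 0 + prixc))
          else (s, some prixc, fen, st.2.2.2.1, st.2.2.2.2))
      (s0, none, [], PySem.Set.empty, m)).2.2.2.2
      = (pvAfold (pvPrixList s0 l.length) m).1 := by
  have hproj : ∀ (a : Int) (b : Option Int × List Int × PySem.Set (List Int) × PySem.Dict (List Int) Int),
      (Prod.mk a b).2.2.2.2 = b.2.2.2 := fun _ _ => rfl
  rw [pv_genB_fold, hproj, pv_core]
theorem pv_Abody (P : List (List Int)) (x : PySem.Dict (List Int) Int) (y : Int) :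
    (List.foldl
      (fun (st : PySem.Dict (List Int) Int × PySem.Set (List Int)) i =>
        if st.2.contains (PySem.List.slice (pvChanges (PySem.List.pyGetD P y [])) (some i) (some (i + 4))) = true
        then st
        else (st.1.modify (PySem.List.slice (pvChanges (PySem.List.pyGetD P y [])) (some i) (some (i + 4))) 0
                (fun v => v + PySem.List.pyGetD (PySem.List.pyGetD P y []) (i + 4) 0),
              st.2.add (PySem.List.slice (pvChanges (PySem.List.pyGetD P y [])) (some i) (some (i + 4)))))
      (x, PySem.Set.empty)
      (PySem.List.pyRange 0 (PySem.List.len (pvChanges (PySem.List.pyGetD P y [])) - 3) 1)).1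
    = (pvAfold (PySem.List.pyGetD P y []) x).1 := rfl

theorem pv_main2 (d : List String) : partie2 d = partie2_alt d := by
  unfold partie2 partie2_alt
  simp only [pv_genA, pv_genB, pv_hlen2000]
  simp only [PySem.List.foldl_append_singleton_eq_map, List.nil_append]
  simp only [show (fun p : List Int =>
      (p.zip (PySem.List.slice p (some 1) none)).map (fun ab => ab.2 - ab.1)) = pvChanges from rfl]
  rw [PySem.List.enumerate_eq_map_pyRange _ ([] : List Int), List.foldl_map]
  simp only [show ∀ (j : Int), PySem.List.pyGetD
        (List.map pvChanges (List.map (fun x => pvPrixList ((PySem.Int.ofStr? x).getD 0) 2000) d)) j []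
      = pvChanges (PySem.List.pyGetD
        (List.map (fun x => pvPrixList ((PySem.Int.ofStr? x).getD 0) 2000) d) j []) from
    fun j => PySem.List.pyGetD_map pvChanges _ j []]
  simp only [pv_Abody]
  rw [show PySem.List.len (List.map pvChanges (List.map (fun x => pvPrixList ((PySem.Int.ofStr? x).getD 0) 2000) d))
        = ((List.map (fun x => pvPrixList ((PySem.Int.ofStr? x).getD 0) 2000) d).length : Int) from by
      simp [PySem.List.len_eq]]
  rw [PySem.List.foldl_pyRange_zero_pyGetD'
      (List.map (fun x => pvPrixList ((PySem.Int.ofStr? x).getD 0) 2000) d) []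
      (fun m p => (pvAfold p m).1) PySem.Dict.empty]
  rw [List.foldl_map]

-- ===== VERDICT (by name: the statement is the Claim_ definition above) =====
theorem partie2_spec : Claim_equal_partie2 := by
  intro donnees _ _
  unfold Spec_partie2
  exact pv_main2 donnees
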